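-- pv_equiv track=rewrite | github.com/Austin-Rager/CS-2100 | five-card-stud.py | handFrequency
-- ===== SOURCE A (Python) =====
-- def getRank(card):
--     return card % 13
--
-- def handRanks(hand):
--     ranks = [getRank(card) for card in hand]
--     ranks.sort()
--     return ranks
--
-- def handFrequency(hand):
--     ranks = handRanks(hand)
--     frequency = {}
--     for rank in ranks:
--         if rank in frequency:
--             frequency[rank] += 1
--         else:
--             frequency[rank] = 1
--     return frequency
-- ===== SOURCE B (Python) =====
-- def handFrequency(hand):
--     counts = [0] * 13
--     for card in hand:
--         counts[card % 13] += 1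
--     return {r: c for r, c in enumerate(counts) if c}
-- ===== Notes on version B (the rewrite author's own statement) =====
-- stated objective: faster
-- what changed: Replaces A's sort + running-dict accumulation with a fixed 13-slot bucket-count array indexed by rank, emitting the nonzero buckets via enumerate; no sort and no dict lookups.
import Mathlib
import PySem

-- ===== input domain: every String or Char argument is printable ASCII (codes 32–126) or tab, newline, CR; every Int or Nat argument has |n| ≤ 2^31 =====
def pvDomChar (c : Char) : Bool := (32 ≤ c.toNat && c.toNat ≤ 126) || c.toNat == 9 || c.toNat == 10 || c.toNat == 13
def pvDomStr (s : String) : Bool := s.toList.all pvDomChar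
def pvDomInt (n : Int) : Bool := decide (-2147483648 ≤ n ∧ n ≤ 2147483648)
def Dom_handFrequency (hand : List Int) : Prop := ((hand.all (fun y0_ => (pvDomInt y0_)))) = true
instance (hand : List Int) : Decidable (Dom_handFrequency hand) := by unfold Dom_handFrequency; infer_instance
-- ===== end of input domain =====

-- B: fixed 13-slot bucket-count array indexed by rank instead of sort + running-dict accumulation; faster (no sort).


-- ===== PORT A =====
def handFrequency (hand : List Int) : List (Int × Int) :=
  -- ranks = handRanks(hand)  (inlined: [card % 13 for card in hand], then .sort())
  let ranks := PySem.List.sorted (hand.map (fun card => PySem.Int.mod card 13)) (fun x => x) false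
  -- frequency = {}; for rank in ranks: if rank in frequency: frequency[rank] += 1 else: frequency[rank] = 1
  let frequency := ranks.foldl
    (fun d rank => if d.contains rank then d.insert rank (d.getD rank 0 + 1) else d.insert rank 1)
    PySem.Dict.empty
  frequency.items

-- ===== PORT B =====
def handFrequency_alt (hand : List Int) : List (Int × Int) :=
  -- counts = [0] * 13; for card in hand: counts[card % 13] += 1
  let counts := hand.foldl
    (fun c card =>
      PySem.List.pySetD c (PySem.Int.mod card 13)
        (PySem.List.pyGetD c (PySem.Int.mod card 13) 0 + 1))
    (List.replicate 13 (0 : Int))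
  -- {r: c for r, c in enumerate(counts) if c}  (keys r = 0..12 are distinct, so items are this filter)
  (PySem.List.enumerate counts).filter (fun rc => rc.2 ≠ 0)

-- ===== PRECONDITION & SPEC =====
def Spec_handFrequency (hand : List Int) (out : List (Int × Int)) : Prop := out = handFrequency_alt hand
instance (hand : List Int) (out : List (Int × Int)) : Decidable (Spec_handFrequency hand out) := by unfold Spec_handFrequency; infer_instance

-- ===== CLAIM (what is proved, stated in full; the proofs are below) =====
def Claim_equal_handFrequency : Prop := ∀ (hand : List Int), Dom_handFrequency hand → Spec_handFrequency hand (handFrequency hand)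

-- ===== LEMMAS AND PROOFS =====

-- A's loop body collapses: when the key is absent, getD gives the default 0, so both branches insert getD+1.
theorem pvStep_eq (d : PySem.Dict Int Int) (r : Int) :
    (if d.contains r then d.insert r (d.getD r 0 + 1) else d.insert r 1) =
      d.insert r (d.getD r 0 + 1) := by
  by_cases h : d.contains r = true
  · simp [h]
  · have hnone : d.get? r = none := by
      have hf : d.contains r = false := by simpa using h
      rw [PySem.Dict.contains_eq_isSome_get?] at hf
      exact Option.not_isSome_iff_eq_none.mp (by simp [hf])
    simp [h, PySem.Dict.getD, hnone]

-- set(xs) (first occurrences in order) is a sublist of xs.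
theorem pvOfList_sublist {α : Type} [BEq α] [LawfulBEq α] (l : List α) :
    (PySem.Set.ofList l).Sublist l := by
  induction l with
  | nil => simp [PySem.Set.ofList, PySem.Set.empty]
  | cons x xs ih =>
    simp only [PySem.Set.ofList_cons, PySem.Set.discard]
    exact List.Sublist.cons₂ x (List.filter_sublist.trans ih)

-- set of an already-sorted list is strictly increasing.
theorem pvOfList_sorted_pairwise_lt (l : List Int) :
    List.Pairwise (· < ·) (PySem.Set.ofList (PySem.List.sorted l (fun x => x) false)) := by
  have hle : List.Pairwise (· ≤ ·) (PySem.Set.ofList (PySem.List.sorted l (fun x => x) false)) :=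
    List.Pairwise.sublist (pvOfList_sublist _) (PySem.List.sorted_pairwise l (fun x => x))
  have hne : List.Pairwise (· ≠ ·) (PySem.Set.ofList (PySem.List.sorted l (fun x => x) false)) :=
    PySem.Set.nodup_ofList _
  exact (hle.and hne).imp (fun h => lt_of_le_of_ne h.1 h.2)

-- sorted(set(xs)) = set(sorted(xs)): same distinct elements, both in the unique strictly increasing order.
theorem pvSorted_ofList_comm (l : List Int) :
    PySem.List.sorted (PySem.Set.ofList l) (fun x => x) false =
      PySem.Set.ofList (PySem.List.sorted l (fun x => x) false) := by
  apply PySem.List.sorted_eq_of_perm_of_pairwise_lt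
  · rw [List.perm_ext_iff_of_nodup (PySem.Set.nodup_ofList _) (PySem.Set.nodup_ofList _)]
    intro a
    simp [PySem.Set.mem_ofList, PySem.List.mem_sorted]
  · exact pvOfList_sorted_pairwise_lt l

-- B's bucket loop preserves the length and adds, in slot j, the number of cards with rank j.
theorem pvCounts_len (hand : List Int) (acc : List Int) :
    (hand.foldl
      (fun c card =>
        PySem.List.pySetD c (PySem.Int.mod card 13)
          (PySem.List.pyGetD c (PySem.Int.mod card 13) 0 + 1)) acc).length = acc.length := by
  induction hand generalizing acc with
  | nil => rfl
  | cons card t ih => rw [List.foldl_cons, ih, PySem.List.length_pySetD]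

theorem pvCounts_getD (hand : List Int) (acc : List Int) (j : Nat)
    (hlen : acc.length = 13) (_hj : j < 13) :
    PySem.List.pyGetD
      (hand.foldl
        (fun c card =>
          PySem.List.pySetD c (PySem.Int.mod card 13)
            (PySem.List.pyGetD c (PySem.Int.mod card 13) 0 + 1)) acc) (j : Int) 0
      = PySem.List.pyGetD acc (j : Int) 0
        + ((hand.map (fun c => PySem.Int.mod c 13)).count (j : Int) : Int) := by
  induction hand generalizing acc with
  | nil => simp
  | cons card t ih =>
    have hr0 : 0 ≤ PySem.Int.mod card 13 := PySem.Int.mod_nonneg card (by norm_num)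
    have hr13 : PySem.Int.mod card 13 < 13 := PySem.Int.mod_lt card (by norm_num)
    have hlen' : (PySem.List.pySetD acc (PySem.Int.mod card 13)
        (PySem.List.pyGetD acc (PySem.Int.mod card 13) 0 + 1)).length = 13 := by
      rw [PySem.List.length_pySetD, hlen]
    rw [List.foldl_cons, ih _ hlen']
    have hcast : PySem.Int.mod card 13 = (((PySem.Int.mod card 13).toNat : Nat) : Int) := by omega
    rw [hcast, PySem.List.pyGetD_pySetD_natCast acc _ j _ _ (by omega)]
    have hmod : PySem.Int.mod card 13 = card % 13 :=
      PySem.Int.mod_eq_emod_of_pos (by norm_num)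
    by_cases h : j = (PySem.Int.mod card 13).toNat
    · rw [if_pos h, ← h]
      have hm : card % 13 = (j : Int) := by rw [← hmod]; omega
      simp only [List.map_cons, List.count_cons]
      simp [hm]
      omega
    · rw [if_neg h]
      have hm : ¬ card % 13 = (j : Int) := by rw [← hmod]; omega
      simp [hm]

-- Every rank card % 13 lies in [0, 13).
theorem pvRanks_bound (hand : List Int) :
    ∀ a ∈ hand.map (fun c => PySem.Int.mod c 13), 0 ≤ a ∧ a < 13 := by
  intro a ha
  obtain ⟨c, _, rfl⟩ := List.mem_map.mp ha
  exact ⟨PySem.Int.mod_nonneg c (by norm_num), PySem.Int.mod_lt c (by norm_num)⟩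

-- ===== VERDICT (by name: the statement is the Claim_ definition above) =====
theorem handFrequency_spec : Claim_equal_handFrequency := by
  intro hand _
  unfold Spec_handFrequency handFrequency handFrequency_alt
  simp only []
  -- abbreviations
  have hstep :
      (fun (d : PySem.Dict Int Int) (rank : Int) =>
          if d.contains rank then d.insert rank (d.getD rank 0 + 1) else d.insert rank 1) =
        fun d rank => d.insert rank (d.getD rank 0 + 1) := by
    funext d rank; exact pvStep_eq d rank
  rw [hstep, PySem.Dict.foldl_insert_getD_add_one_eq_counter, PySem.Dict.items_counter]
  -- names
  set ranks := hand.map (fun card => PySem.Int.mod card 13) with hranks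
  set counts := hand.foldl
    (fun c card =>
      PySem.List.pySetD c (PySem.Int.mod card 13)
        (PySem.List.pyGetD c (PySem.Int.mod card 13) 0 + 1))
    (List.replicate 13 (0 : Int)) with hcounts
  have hclen : counts.length = 13 := by
    rw [hcounts, pvCounts_len]; simp
  -- slot j of counts is the number of cards of rank j
  have hslot : ∀ j : Int, 0 ≤ j → j < 13 →
      PySem.List.pyGetD counts j 0 = (ranks.count j : Int) := by
    intro j hj0 hj13
    have hjc : j = ((j.toNat : Nat) : Int) := by omega
    have hrep : PySem.List.pyGetD (List.replicate 13 (0 : Int)) ((j.toNat : Nat) : Int) 0 = 0 := by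
      rw [PySem.List.pyGetD_natCast, List.getD_eq_getElem?_getD, List.getElem?_replicate]
      simp [show j.toNat < 13 by omega]
    rw [hjc, hcounts, pvCounts_getD hand _ j.toNat (by simp) (by omega), hrep]
    simp [hranks]
  -- B's enumerate-filter as a map over the strictly increasing key list M
  have henum : PySem.List.enumerate counts =
      (PySem.List.pyRange 0 13 1).map (fun j => (j, PySem.List.pyGetD counts j 0)) := by
    rw [PySem.List.enumerate_eq_map_pyRange counts 0]
    congr 1
    simp [PySem.List.len_eq, hclen]
  rw [henum, List.filter_map]
  have hfil : (PySem.List.pyRange 0 13 1).filter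
        ((fun (rc : Int × Int) => decide (rc.2 ≠ 0)) ∘ (fun j => (j, PySem.List.pyGetD counts j 0)))
      = (PySem.List.pyRange 0 13 1).filter (fun j => decide (ranks.count j ≠ 0)) := by
    apply List.filter_congr
    intro j hj
    have hjb := (PySem.List.mem_pyRange_one).mp hj
    simp [Function.comp, hslot j hjb.1 hjb.2]
  rw [hfil]
  -- the filtered range and the map agree with A's key list and values
  have hmapval : ((PySem.List.pyRange 0 13 1).filter (fun j => decide (ranks.count j ≠ 0))).map
        (fun j => (j, PySem.List.pyGetD counts j 0))
      = ((PySem.List.pyRange 0 13 1).filter (fun j => decide (ranks.count j ≠ 0))).map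
        (fun j => (j, (ranks.count j : Int))) := by
    apply List.map_congr_left
    intro j hj
    have hjr := List.mem_of_mem_filter hj
    have hjb := (PySem.List.mem_pyRange_one).mp hjr
    rw [hslot j hjb.1 hjb.2]
  rw [hmapval]
  -- A's key list sorted(set(.)) of the sorted ranks equals the filtered range M
  have hM : PySem.Set.ofList (PySem.List.sorted ranks (fun x => x) false)
      = (PySem.List.pyRange 0 13 1).filter (fun j => decide (ranks.count j ≠ 0)) := by
    rw [← pvSorted_ofList_comm]
    apply PySem.List.sorted_eq_of_perm_of_pairwise_lt
    · -- permutation: both are the distinct elements of ranks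
      have hnodupM : ((PySem.List.pyRange 0 13 1).filter
          (fun j => decide (ranks.count j ≠ 0))).Nodup :=
        (PySem.List.nodup_pyRange_one 0 13).filter _
      rw [List.perm_ext_iff_of_nodup hnodupM (PySem.Set.nodup_ofList _)]
      intro a
      rw [PySem.Set.mem_ofList, List.mem_filter, PySem.List.mem_pyRange_one]
      constructor
      · rintro ⟨_, hc⟩
        exact List.count_pos_iff.mp (Nat.pos_of_ne_zero (by simpa using hc))
      · intro ha
        have hb := pvRanks_bound hand a ha
        exact ⟨⟨hb.1, hb.2⟩, by simpa using (List.count_pos_iff.mpr ha).ne'⟩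
    · -- strictly increasing: a sublist of range(0, 13)
      exact List.Pairwise.sublist List.filter_sublist (PySem.List.pairwise_lt_pyRange_one 0 13)
  rw [hM]
  -- finally, counts over the sorted list are counts over ranks
  apply List.map_congr_left
  intro k _
  rw [(PySem.List.sorted_perm ranks (fun x => x) false).count_eq]
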